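-- pv_equiv track=rewrite | github.com/cutehammond772/problem-solving-archive | 백준/Platinum/10937. 두부 모판 자르기/두부 모판 자르기.py | solve
-- ===== SOURCE A (Python) =====
-- scores = [
--   [100, 70, 40, 0],
--   [ 70, 50, 30, 0],
--   [ 40, 30, 20, 0],
--   [  0,  0,  0, 0]
-- ]
--
-- def solve(N, matrix):
--   memo = [[-1] * (1 << N) for _ in range(N * N)]
--
--   def get(x, y):
--     rx, cx = x // N, x % N
--     ry, cy = y // N, y % N
--
--     return scores[matrix[rx][cx]][matrix[ry][cy]]
--
--   def calculate(offset, bit):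
--     if offset >= N * N:
--       return 0
--
--     if memo[offset][bit] >= 0:
--       return memo[offset][bit]
--
--     result = 0
--
--     # 1. 현 위치에 점유한 공간이 없는 경우
--     if not bit & 1:
--       # 1-1. 가로 두 칸을 점유할 경우
--       if (offset + 1) % N and not bit & 2:
--         result = max(result, get(offset, offset + 1) + calculate(offset + 2, bit >> 2))
--
--       # 1-2. 세로 두 칸을 점유할 경우
--       if (offset + N) < N * N:
--         result = max(result, get(offset, offset + N) + calculate(offset + 1, (bit | 1 << N) >> 1))
--
--     # 2. 해당 칸을 그냥 넘기는 경우
--     result = max(result, calculate(offset + 1, bit >> 1))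
--
--     # 메모이제이션
--     memo[offset][bit] = result
--     return result
--
--   return calculate(0, 0)
-- ===== SOURCE B (Python) =====
-- scores = [
--   [100, 70, 40, 0],
--   [ 70, 50, 30, 0],
--   [ 40, 30, 20, 0],
--   [  0,  0,  0, 0]
-- ]
--
-- def solve(N, matrix):
--   size = N * N
--   W = 1 << N
--
--   def get(x, y):
--     rx, cx = x // N, x % N
--     ry, cy = y // N, y % N
--     return scores[matrix[rx][cx]][matrix[ry][cy]]
--
--   # bottom-up over offsets; nxt = dp[offset+1], nxt2 = dp[offset+2]
--   nxt = [0] * W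
--   nxt2 = [0] * W
--   for offset in range(size - 1, -1, -1):
--     cur = [0] * W
--     for bit in range(W):
--       best = 0
--       if not bit & 1:
--         if (offset + 1) % N and not bit & 2:
--           best = max(best, get(offset, offset + 1) + nxt2[bit >> 2])
--         if offset + N < size:
--           best = max(best, get(offset, offset + N) + nxt[(bit | 1 << N) >> 1])
--       cur[bit] = max(best, nxt[bit >> 1])
--     nxt, nxt2 = cur, nxt
--   return nxt[0]
-- ===== Notes on version B (the rewrite author's own statement) =====
-- stated objective: alternative
-- what changed: Replaces A's memoized top-down recursion (a memo table indexed by offset and profile bitmask, filled on demand) with an explicit bottom-up DP that sweeps offsets from N*N-1 down to 0, computing each profile row from the two previously computed rows and keeping only those two rows.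
import Mathlib
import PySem

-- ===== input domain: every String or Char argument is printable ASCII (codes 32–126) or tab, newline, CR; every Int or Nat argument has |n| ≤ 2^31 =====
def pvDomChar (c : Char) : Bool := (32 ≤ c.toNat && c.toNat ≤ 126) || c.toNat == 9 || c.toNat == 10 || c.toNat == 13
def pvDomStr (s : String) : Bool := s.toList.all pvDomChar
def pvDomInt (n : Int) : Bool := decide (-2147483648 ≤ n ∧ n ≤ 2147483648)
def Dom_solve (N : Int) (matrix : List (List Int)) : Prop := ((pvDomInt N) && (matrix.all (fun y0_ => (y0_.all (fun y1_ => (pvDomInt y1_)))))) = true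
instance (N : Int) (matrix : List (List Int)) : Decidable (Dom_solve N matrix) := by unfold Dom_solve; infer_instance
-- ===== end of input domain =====

-- B replaces A's memoized top-down recursion by an explicit bottom-up DP over the same
-- (offset, profile-bit) states, keeping only the two previously computed rows (alternative
-- decomposition, same asymptotic cost).

-- ===== PORT A =====
def scoresL : List (List Int) := [[100,70,40,0],[70,50,30,0],[40,30,20,0],[0,0,0,0]]

-- shared cell-score lookup (both Pythons define the identical `get`); pyGet? is exact
-- Python indexing (negative wrap, none = IndexError), defaulted only outside Pre_.
def getCell (n : Nat) (matrix : List (List Int)) (x y : Nat) : Int :=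
  let ex := (PySem.List.pyGet? ((PySem.List.pyGet? matrix ((x / n : Nat) : Int)).getD []) ((x % n : Nat) : Int)).getD 0
  let ey := (PySem.List.pyGet? ((PySem.List.pyGet? matrix ((y / n : Nat) : Int)).getD []) ((y % n : Nat) : Int)).getD 0
  (PySem.List.pyGet? ((PySem.List.pyGet? scoresL ex).getD []) ey).getD 0

-- A's `calculate`, with the mutated memo list threaded through as state; the fuel
-- argument (n*n suffices, since offset grows each call) only makes the recursion
-- structural — with enough fuel the 0-fuel arm is unreachable.
def calcA (n : Nat) (matrix : List (List Int)) :
    Nat → Nat → Nat → List (List Int) → Int × List (List Int)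
  | 0, _, _, memo => (0, memo)
  | fuel + 1, offset, bit, memo =>
    if n * n ≤ offset then (0, memo)
    else
      let cached := (memo.getD offset []).getD bit (-1)
      if 0 ≤ cached then (cached, memo)
      else
        let s1 :=
          if bit &&& 1 = 0 then
            let s2 :=
              if (offset + 1) % n ≠ 0 ∧ bit &&& 2 = 0 then
                let r := calcA n matrix fuel (offset + 2) (bit >>> 2) memo
                (max (0:Int) (getCell n matrix offset (offset + 1) + r.1), r.2)
              else ((0 : Int), memo)
            if offset + n < n * n then
              let r := calcA n matrix fuel (offset + 1) ((bit ||| (1 <<< n)) >>> 1) s2.2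
              (max s2.1 (getCell n matrix offset (offset + n) + r.1), r.2)
            else s2
          else ((0 : Int), memo)
        let r := calcA n matrix fuel (offset + 1) (bit >>> 1) s1.2
        let result := max s1.1 r.1
        (result, r.2.set offset ((r.2.getD offset []).set bit result))

def solve (N : Int) (matrix : List (List Int)) : Int :=
  let n := N.toNat
  (calcA n matrix (n * n) 0 0 (List.replicate (n * n) (List.replicate (1 <<< n) (-1)))).1

-- ===== PORT B =====
-- one bottom-up row: dp[offset], given nxt = dp[offset+1] and nxt2 = dp[offset+2]
def rowB (n : Nat) (matrix : List (List Int)) (size offset : Nat) (nxt nxt2 : List Int) : List Int :=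
  (List.range (1 <<< n)).map (fun bit =>
    let best :=
      if bit &&& 1 = 0 then
        let b2 :=
          if (offset + 1) % n ≠ 0 ∧ bit &&& 2 = 0 then
            max (0:Int) (getCell n matrix offset (offset + 1) + nxt2.getD (bit >>> 2) 0)
          else (0 : Int)
        if offset + n < size then
          max b2 (getCell n matrix offset (offset + n) + nxt.getD ((bit ||| (1 <<< n)) >>> 1) 0)
        else b2
      else (0 : Int)
    max best (nxt.getD (bit >>> 1) 0))

-- the `for offset in range(size-1, -1, -1)` sweep: after k iterations the pair is
-- (dp[size-k], dp[size-k+1])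
def buildB (n : Nat) (matrix : List (List Int)) (size : Nat) : Nat → List Int × List Int
  | 0 => (List.replicate (1 <<< n) 0, List.replicate (1 <<< n) 0)
  | k + 1 =>
    let p := buildB n matrix size k
    (rowB n matrix size (size - (k + 1)) p.1 p.2, p.1)

def solve_alt (N : Int) (matrix : List (List Int)) : Int :=
  let n := N.toNat
  ((buildB n matrix (n * n) (n * n)).1).getD 0 0

-- ===== PRECONDITION & SPEC =====
-- Pre_ = exactly where Python A returns: N ≥ 0 (a negative shift raises ValueError), and for
-- N ≥ 2 every cell of the N×N board must exist and index `scores` (entries in [-4, 4));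
-- for N ≤ 1 the board is never read.
def Pre_solve (N : Int) (matrix : List (List Int)) : Prop :=
  0 ≤ N ∧ (N < 2 ∨
    (N.toNat ≤ matrix.length ∧ ∀ row ∈ matrix.take N.toNat,
      N.toNat ≤ row.length ∧ ∀ e ∈ row.take N.toNat, -4 ≤ e ∧ e < 4))
instance (N : Int) (matrix : List (List Int)) : Decidable (Pre_solve N matrix) := by
  unfold Pre_solve; infer_instance

def pvWitness_solve : Int × List (List Int) := (2, [[0, 1], [1, 2]])

def Spec_solve (N : Int) (matrix : List (List Int)) (out : Int) : Prop := out = solve_alt N matrix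
instance (N : Int) (matrix : List (List Int)) (out : Int) : Decidable (Spec_solve N matrix out) := by
  unfold Spec_solve; infer_instance

-- ===== CLAIM (what is proved, stated in full; the proofs are below) =====
def Claim_equal_solve : Prop := ∀ (N : Int) (matrix : List (List Int)),
  Dom_solve N matrix → Pre_solve N matrix → Spec_solve N matrix (solve N matrix)

-- ===== LEMMAS AND PROOFS =====

-- ghost: the pure (memo-free) value of A's recursion
def calcP (n : Nat) (matrix : List (List Int)) (offset bit : Nat) : Int :=
  if n * n ≤ offset then 0
  else
    let s1 :=
      if bit &&& 1 = 0 then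
        let s2 :=
          if (offset + 1) % n ≠ 0 ∧ bit &&& 2 = 0 then
            max (0:Int) (getCell n matrix offset (offset + 1) + calcP n matrix (offset + 2) (bit >>> 2))
          else (0 : Int)
        if offset + n < n * n then
          max s2 (getCell n matrix offset (offset + n) + calcP n matrix (offset + 1) ((bit ||| (1 <<< n)) >>> 1))
        else s2
      else (0 : Int)
    max s1 (calcP n matrix (offset + 1) (bit >>> 1))
termination_by n * n - offset
decreasing_by all_goals omega

-- memo invariant: every nonnegative cached entry is the pure value
def InvM (n : Nat) (matrix : List (List Int)) (memo : List (List Int)) : Prop :=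
  ∀ o b, 0 ≤ (memo.getD o []).getD b (-1) → (memo.getD o []).getD b (-1) = calcP n matrix o b

theorem getD_set {α : Type} (l : List α) (i j : Nat) (a d : α) :
    (l.set i a).getD j d = if i = j ∧ i < l.length then a else l.getD j d := by
  simp only [List.getD, List.getElem?_set]
  split_ifs with h1 h2 h3 h4 <;> simp_all
  omega

theorem InvM_set (n : Nat) (matrix : List (List Int)) (memo : List (List Int))
    (offset bit : Nat) (res : Int) (hinv : InvM n matrix memo)
    (hres : res = calcP n matrix offset bit) :
    InvM n matrix (memo.set offset ((memo.getD offset []).set bit res)) := by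
  intro o b
  rw [getD_set]
  split_ifs with h1
  · obtain ⟨rfl, -⟩ := h1
    rw [getD_set]
    split_ifs with h2
    · obtain ⟨rfl, -⟩ := h2
      intro _; exact hres
    · exact hinv offset b
  · exact hinv o b

theorem calcA_correct (n : Nat) (matrix : List (List Int)) :
    ∀ (f offset bit : Nat) (memo : List (List Int)), n * n - offset ≤ f →
      InvM n matrix memo →
      (calcA n matrix f offset bit memo).1 = calcP n matrix offset bit ∧
      InvM n matrix (calcA n matrix f offset bit memo).2 := by
  intro f
  induction f with
  | zero =>
    intro offset bit memo hle hinv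
    have hoff : n * n ≤ offset := by omega
    rw [calcA, calcP, if_pos hoff]
    exact ⟨rfl, hinv⟩
  | succ f ih =>
    intro offset bit memo hle hinv
    by_cases hoff : n * n ≤ offset
    · rw [calcA, if_pos hoff, calcP, if_pos hoff]
      exact ⟨rfl, hinv⟩
    · by_cases hc : 0 ≤ (memo.getD offset []).getD bit (-1)
      · rw [calcA, if_neg hoff]
        simp only [if_pos hc]
        exact ⟨hinv offset bit hc, hinv⟩
      · rw [calcA, if_neg hoff]
        simp only [if_neg hc]
        by_cases h1 : bit &&& 1 = 0
        · by_cases h2 : (offset + 1) % n ≠ 0 ∧ bit &&& 2 = 0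
          · by_cases h3 : offset + n < n * n
            · simp only [if_pos h1, if_pos h2, if_pos h3]
              obtain ⟨e3, i3⟩ := ih (offset + 2) (bit >>> 2) memo (by omega) hinv
              obtain ⟨e2, i2⟩ := ih (offset + 1) ((bit ||| 1 <<< n) >>> 1) _ (by omega) i3
              obtain ⟨e1, i1⟩ := ih (offset + 1) (bit >>> 1) _ (by omega) i2
              refine ⟨?_, InvM_set _ _ _ _ _ _ i1 ?_⟩ <;>
              · rw [calcP, if_neg hoff]
                simp only [if_pos h1, if_pos h2, if_pos h3]
                rw [e3, e2, e1]
            · simp only [if_pos h1, if_pos h2, if_neg h3]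
              obtain ⟨e3, i3⟩ := ih (offset + 2) (bit >>> 2) memo (by omega) hinv
              obtain ⟨e1, i1⟩ := ih (offset + 1) (bit >>> 1) _ (by omega) i3
              refine ⟨?_, InvM_set _ _ _ _ _ _ i1 ?_⟩ <;>
              · rw [calcP, if_neg hoff]
                simp only [if_pos h1, if_pos h2, if_neg h3]
                rw [e3, e1]
          · by_cases h3 : offset + n < n * n
            · simp only [if_pos h1, if_neg h2, if_pos h3]
              obtain ⟨e2, i2⟩ := ih (offset + 1) ((bit ||| 1 <<< n) >>> 1) memo (by omega) hinv
              obtain ⟨e1, i1⟩ := ih (offset + 1) (bit >>> 1) _ (by omega) i2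
              refine ⟨?_, InvM_set _ _ _ _ _ _ i1 ?_⟩ <;>
              · rw [calcP, if_neg hoff]
                simp only [if_pos h1, if_neg h2, if_pos h3]
                rw [e2, e1]
            · simp only [if_pos h1, if_neg h2, if_neg h3]
              obtain ⟨e1, i1⟩ := ih (offset + 1) (bit >>> 1) memo (by omega) hinv
              refine ⟨?_, InvM_set _ _ _ _ _ _ i1 ?_⟩ <;>
              · rw [calcP, if_neg hoff]
                simp only [if_pos h1, if_neg h2, if_neg h3]
                rw [e1]
        · simp only [if_neg h1]
          obtain ⟨e1, i1⟩ := ih (offset + 1) (bit >>> 1) memo (by omega) hinv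
          refine ⟨?_, InvM_set _ _ _ _ _ _ i1 ?_⟩ <;>
          · rw [calcP, if_neg hoff]
            simp only [if_neg h1]
            rw [e1]


theorem getD_map_range_lt {W bit : Nat} (f : Nat → Int) (h : bit < W) :
    ((List.range W).map f).getD bit 0 = f bit := by
  simp [List.getD, h]

theorem shiftLeft_one_eq (n : Nat) : 1 <<< n = 2 ^ n := by
  simp [Nat.shiftLeft_eq]

theorem or_shift_lt {n bit : Nat} (h : bit < 1 <<< n) : (bit ||| 1 <<< n) >>> 1 < 1 <<< n := by
  rw [shiftLeft_one_eq] at *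
  have h1 : bit ||| 2 ^ n < 2 ^ (n + 1) :=
    Nat.or_lt_two_pow (lt_of_lt_of_le h (Nat.pow_le_pow_right (by omega) (by omega)))
      (Nat.pow_lt_pow_right (by omega) (by omega))
  have h2 : (bit ||| 2 ^ n) >>> 1 = (bit ||| 2 ^ n) / 2 := by
    simp [Nat.shiftRight_eq_div_pow]
  rw [h2]
  rw [pow_succ] at h1
  omega

theorem shiftR_lt {n bit : Nat} (h : bit < 1 <<< n) (k : Nat) : bit >>> k < 1 <<< n :=
  lt_of_le_of_lt (Nat.shiftRight_le _ _) h

theorem buildB_correct (n : Nat) (matrix : List (List Int)) :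
    ∀ k, k ≤ n * n → ∀ bit, bit < 1 <<< n →
      ((buildB n matrix (n * n) k).1.getD bit 0 = calcP n matrix (n * n - k) bit) ∧
      ((buildB n matrix (n * n) k).2.getD bit 0 = calcP n matrix (n * n - k + 1) bit) := by
  intro k
  induction k with
  | zero =>
    intro _ bit hbit
    constructor <;>
    · rw [calcP, if_pos (by omega)]
      simp [buildB, List.getD, hbit]
  | succ k ih =>
    intro hk bit hbit
    have ihk := ih (by omega)
    have ho1 : n * n - (k + 1) + 1 = n * n - k := by omega
    have ho2 : n * n - (k + 1) + 2 = n * n - k + 1 := by omega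
    have i1 : calcP n matrix (n * n - (k + 1) + 1) (bit >>> 1)
        = (buildB n matrix (n * n) k).1.getD (bit >>> 1) 0 := by
      rw [ho1]; exact ((ihk _ (shiftR_lt hbit 1)).1).symm
    have i2 : calcP n matrix (n * n - (k + 1) + 2) (bit >>> 2)
        = (buildB n matrix (n * n) k).2.getD (bit >>> 2) 0 := by
      rw [ho2]; exact ((ihk _ (shiftR_lt hbit 2)).2).symm
    have i3 : calcP n matrix (n * n - (k + 1) + 1) ((bit ||| 1 <<< n) >>> 1)
        = (buildB n matrix (n * n) k).1.getD ((bit ||| 1 <<< n) >>> 1) 0 := by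
      rw [ho1]; exact ((ihk _ (or_shift_lt hbit)).1).symm
    constructor
    · rw [calcP, if_neg (by omega), i1, i2, i3]
      simp only [buildB, rowB]
      rw [getD_map_range_lt _ hbit]
    · simp only [buildB]
      rw [ho1]
      exact (ihk bit hbit).1

-- ===== VERDICT (by name: the statement is the Claim_ definition above) =====
theorem solve_spec : Claim_equal_solve := by
  intro N matrix _ _
  have h2n : 0 < 1 <<< N.toNat := by simp [Nat.shiftLeft_eq]
  have hinv0 : InvM N.toNat matrix
      (List.replicate (N.toNat * N.toNat) (List.replicate (1 <<< N.toNat) (-1))) := by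
    intro o b h
    exfalso
    revert h
    simp [List.getD, List.getElem?_replicate]
    split_ifs <;> simp
  have hA := (calcA_correct N.toNat matrix (N.toNat * N.toNat) 0 0
      (List.replicate (N.toNat * N.toNat) (List.replicate (1 <<< N.toNat) (-1)))
      (by omega) hinv0).1
  have hB := (buildB_correct N.toNat matrix (N.toNat * N.toNat) le_rfl 0 h2n).1
  rw [Nat.sub_self] at hB
  unfold Spec_solve solve solve_alt
  exact hA.trans hB.symm
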